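-- pv_equiv track=rewrite | github.com/ben5736/Algorithms | python/problems/internval.py | removeElementFromIntervals
-- ===== SOURCE A (Python) =====
-- def removeElementFromIntervals(intervals, index):
--   ret = []
--   intervals = sorted(intervals)
--
--   for interval in intervals:
--     start, end = interval
--     length = end - start + 1
--
--     if index == -1:
--       ret.append(interval)
--     elif index >= length:
--       index -= length
--       ret.append(interval)
--     else:
--       if length == 1:
--         pass # just skip this single element interval
--       elif index == 0:
--         ret.append((start + 1, end))
--       elif index == length - 1:
--         ret.append((start, end - 1))
--       else:
--         ret.append((start, start + index - 1))
--         ret.append((start + index + 1, end))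
--
--       index = -1
--   return ret
-- ===== SOURCE B (Python) =====
-- def removeElementFromIntervals(intervals, index):
--     xs = sorted(intervals)
--     if index == -1:
--         return xs
--     # prefix-sum table: cums[i] = total length of xs[0..i]
--     cums = []
--     t = 0
--     for s, e in xs:
--         t += e - s + 1
--         cums.append(t)
--     # the affected interval is the first i with index < cums[i];
--     # assemble the answer by slicing around it
--     for i, ((s, e), c) in enumerate(zip(xs, cums)):
--         if index < c:
--             off = index - (c - (e - s + 1))
--             return xs[:i] + _split(s, e, off) + xs[i + 1:]
--     return xs
--
-- def _split(s, e, off):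
--     length = e - s + 1
--     if length == 1:
--         return []
--     if off == 0:
--         return [(s + 1, e)]
--     if off == length - 1:
--         return [(s, e - 1)]
--     return [(s, s + off - 1), (s + off + 1, e)]
-- ===== Notes on version B (the rewrite author's own statement) =====
-- stated objective: alternative
-- what changed: A's stateful fold (mutable running index with a -1 sentinel, output grown one interval at a time) is replaced by a table-driven construction: precompute a prefix-sum table of interval lengths, find the first position whose cumulative length exceeds the index, and assemble the result in one step as slice + split + slice.
import Mathlib
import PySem

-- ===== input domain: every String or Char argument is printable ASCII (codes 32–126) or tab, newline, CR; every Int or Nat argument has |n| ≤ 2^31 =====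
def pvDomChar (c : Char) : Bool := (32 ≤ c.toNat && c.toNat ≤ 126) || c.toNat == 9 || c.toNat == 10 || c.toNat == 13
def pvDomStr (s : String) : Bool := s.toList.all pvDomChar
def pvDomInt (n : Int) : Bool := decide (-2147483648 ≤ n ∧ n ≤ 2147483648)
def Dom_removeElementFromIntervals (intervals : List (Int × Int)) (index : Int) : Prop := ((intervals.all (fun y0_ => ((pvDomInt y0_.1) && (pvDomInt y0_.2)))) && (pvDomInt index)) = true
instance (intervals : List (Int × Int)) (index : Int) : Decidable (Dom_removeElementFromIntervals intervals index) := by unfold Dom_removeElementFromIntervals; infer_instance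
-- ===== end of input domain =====

-- B replaces A's stateful fold (mutable index, -1 sentinel, element-by-element output)
-- by a prefix-sum table + one slice-split-slice assembly; objective: alternative (same cost).

-- ===== PORT A =====
-- the loop body of A's for-loop, on state (ret, index)
def pvStepA (st : List (Int × Int) × Int) (interval : Int × Int) : List (Int × Int) × Int :=
  let start := interval.1
  let e := interval.2
  let length := e - start + 1
  if st.2 = -1 then (st.1 ++ [interval], st.2)
  else if st.2 ≥ length then (st.1 ++ [interval], st.2 - length)
  else
    ((if length = 1 then st.1
      else if st.2 = 0 then st.1 ++ [(start + 1, e)]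
      else if st.2 = length - 1 then st.1 ++ [(start, e - 1)]
      else st.1 ++ [(start, start + st.2 - 1), (start + st.2 + 1, e)]), -1)

def removeElementFromIntervals (intervals : List (Int × Int)) (index : Int) : List (Int × Int) :=
  ((PySem.List.sorted2 intervals Prod.fst Prod.snd).foldl pvStepA ([], index)).1

-- ===== PORT B =====
-- B's helper _split
def pvSplit (s e off : Int) : List (Int × Int) :=
  let length := e - s + 1
  if length = 1 then []
  else if off = 0 then [(s + 1, e)]
  else if off = length - 1 then [(s, e - 1)]
  else [(s, s + off - 1), (s + off + 1, e)]

-- B's prefix-sum table: cums[i] = total length of xs[0..i]  (the t-accumulating loop)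
def pvCums (xs : List (Int × Int)) : List Int :=
  (xs.foldl (fun st p => (st.1 + (p.2 - p.1 + 1), st.2 ++ [st.1 + (p.2 - p.1 + 1)])) (0, [])).2

-- B's search loop: for i, ((s,e), c) in enumerate(zip(xs, cums)): if index < c: return slices
def pvSearch (xs : List (Int × Int)) (index : Int) : List ((Int × Int) × Int) → Nat → List (Int × Int)
  | [], _ => xs
  | (se, c) :: rest, i =>
      if index < c then
        xs.take i ++ pvSplit se.1 se.2 (index - (c - (se.2 - se.1 + 1))) ++ xs.drop (i + 1)
      else pvSearch xs index rest (i + 1)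

def removeElementFromIntervals_alt (intervals : List (Int × Int)) (index : Int) : List (Int × Int) :=
  let xs := PySem.List.sorted2 intervals Prod.fst Prod.snd
  if index = -1 then xs
  else pvSearch xs index (xs.zip (pvCums xs)) 0

-- ===== PRECONDITION & SPEC =====
def Spec_removeElementFromIntervals (intervals : List (Int × Int)) (index : Int) (out : List (Int × Int)) : Prop := out = removeElementFromIntervals_alt intervals index
instance (intervals : List (Int × Int)) (index : Int) (out : List (Int × Int)) : Decidable (Spec_removeElementFromIntervals intervals index out) := by unfold Spec_removeElementFromIntervals; infer_instance

-- ===== CLAIM (what is proved, stated in full; the proofs are below) =====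
def Claim_equal_removeElementFromIntervals : Prop := ∀ (intervals : List (Int × Int)) (index : Int), Dom_removeElementFromIntervals intervals index → Spec_removeElementFromIntervals intervals index (removeElementFromIntervals intervals index)

-- ===== LEMMAS AND PROOFS =====

-- a common recursive specification both programs are reduced to
def pvSpecRec : List (Int × Int) → Int → List (Int × Int)
  | [], _ => []
  | (s, e) :: rest, idx =>
    if idx = -1 then (s, e) :: rest
    else if idx ≥ e - s + 1 then (s, e) :: pvSpecRec rest (idx - (e - s + 1))
    else pvSplit s e idx ++ rest

-- prefix sums with an explicit running base, for reasoning
def pvCumsR : List (Int × Int) → Int → List Int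
  | [], _ => []
  | (s, e) :: rest, t => (t + (e - s + 1)) :: pvCumsR rest (t + (e - s + 1))

theorem pvCums_fold (xs : List (Int × Int)) (t : Int) (acc : List Int) :
    (xs.foldl (fun st p => (st.1 + (p.2 - p.1 + 1), st.2 ++ [st.1 + (p.2 - p.1 + 1)])) (t, acc)).2
      = acc ++ pvCumsR xs t := by
  induction xs generalizing t acc with
  | nil => simp [pvCumsR]
  | cons y rest ih =>
    obtain ⟨s, e⟩ := y
    simp only [List.foldl_cons, pvCumsR, ih]
    simp

theorem pvCums_eq (xs : List (Int × Int)) : pvCums xs = pvCumsR xs 0 := by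
  unfold pvCums
  rw [pvCums_fold]
  simp

-- ===== A-side: the fold equals the recursive spec =====

theorem pvStepA_acc (acc : List (Int × Int)) (idx : Int) (y : Int × Int) :
    pvStepA (acc, idx) y = (acc ++ (pvStepA ([], idx) y).1, (pvStepA ([], idx) y).2) := by
  simp only [pvStepA]
  split_ifs <;> simp

theorem pvFoldA_acc (ys : List (Int × Int)) (acc : List (Int × Int)) (idx : Int) :
    (ys.foldl pvStepA (acc, idx)).1 = acc ++ (ys.foldl pvStepA ([], idx)).1 := by
  induction ys generalizing acc idx with
  | nil => simp
  | cons y rest ih =>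
    simp only [List.foldl_cons]
    rw [pvStepA_acc acc idx y, ih, ih (pvStepA ([], idx) y).1]
    simp

theorem pvFoldA_neg1 (ys : List (Int × Int)) (acc : List (Int × Int)) :
    (ys.foldl pvStepA (acc, -1)).1 = acc ++ ys := by
  induction ys generalizing acc with
  | nil => simp
  | cons y rest ih =>
    simp only [List.foldl_cons]
    have h : pvStepA (acc, -1) y = (acc ++ [y], -1) := by simp [pvStepA]
    rw [h, ih]; simp

theorem pvStepA_split (idx s e : Int) (h1 : idx ≠ -1) (h2 : ¬ idx ≥ e - s + 1) :
    pvStepA ([], idx) (s, e) = (pvSplit s e idx, -1) := by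
  simp only [pvStepA, pvSplit]
  split_ifs <;> simp_all

theorem pvA_eq_spec (ys : List (Int × Int)) (idx : Int) (hidx : idx ≠ -1) :
    (ys.foldl pvStepA ([], idx)).1 = pvSpecRec ys idx := by
  induction ys generalizing idx with
  | nil => simp [pvSpecRec]
  | cons y rest ih =>
    obtain ⟨s, e⟩ := y
    by_cases hge : idx ≥ e - s + 1
    · have hstep : pvStepA ([], idx) (s, e) = ([(s, e)], idx - (e - s + 1)) := by
        simp only [pvStepA]
        split_ifs <;> simp_all
      have hne : idx - (e - s + 1) ≠ -1 := by omega
      simp only [List.foldl_cons, hstep]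
      rw [pvFoldA_acc, ih _ hne]
      simp only [pvSpecRec, hidx, if_false, hge, if_true]
      simp
    · simp only [List.foldl_cons]
      rw [pvStepA_split idx s e hidx hge, pvFoldA_neg1]
      simp [pvSpecRec, hidx, hge]

-- ===== B-side: the table search equals the recursive spec =====

theorem pvB_eq_spec (xs : List (Int × Int)) :
    ∀ (pre : List (Int × Int)) (index t : Int), index - t ≠ -1 →
    pvSearch (pre ++ xs) index (xs.zip (pvCumsR xs t)) pre.length
      = pre ++ pvSpecRec xs (index - t) := by
  induction xs with
  | nil => intro pre index t _; simp [pvSearch, pvSpecRec]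
  | cons y rest ih =>
    intro pre index t hne
    obtain ⟨s, e⟩ := y
    simp only [pvCumsR, List.zip_cons_cons, pvSearch]
    by_cases hlt : index < t + (e - s + 1)
    · simp only [hlt, if_true]
      have htake : (pre ++ (s, e) :: rest).take pre.length = pre := by
        simp
      have hdrop : (pre ++ (s, e) :: rest).drop (pre.length + 1) = rest := by
        have h2 : pre ++ (s, e) :: rest = (pre ++ [(s, e)]) ++ rest := by simp
        have h3 : pre.length + 1 = (pre ++ [(s, e)]).length := by simp
        rw [h2, h3, List.drop_left]
      rw [htake, hdrop]
      have hoff : index - (t + (e - s + 1) - (e - s + 1)) = index - t := by ring_nf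
      rw [hoff]
      simp only [pvSpecRec, hne, if_false]
      have hng : ¬ index - t ≥ e - s + 1 := by omega
      simp [hng]
    · simp only [hlt, if_false]
      have hpre : (pre ++ [(s, e)]).length = pre.length + 1 := by simp
      have hxs : pre ++ (s, e) :: rest = (pre ++ [(s, e)]) ++ rest := by simp
      have hne' : index - (t + (e - s + 1)) ≠ -1 := by omega
      rw [hxs, ← hpre, ih (pre ++ [(s, e)]) index (t + (e - s + 1)) hne']
      simp only [pvSpecRec, hne, if_false]
      have hg : index - t ≥ e - s + 1 := by omega
      have harg : index - (t + (e - s + 1)) = index - t - (e - s + 1) := by ring_nf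
      simp [hg, harg]

-- ===== VERDICT (by name: the statement is the Claim_ definition above) =====
theorem removeElementFromIntervals_spec : Claim_equal_removeElementFromIntervals := by
  intro intervals index _
  unfold Spec_removeElementFromIntervals removeElementFromIntervals removeElementFromIntervals_alt
  set ys := PySem.List.sorted2 intervals Prod.fst Prod.snd with hys
  by_cases h1 : index = -1
  · subst h1
    rw [pvFoldA_neg1 ys []]
    simp
  · simp only [h1, if_false]
    rw [pvA_eq_spec ys index h1, pvCums_eq]
    have := pvB_eq_spec ys [] index 0 (by omega)
    simp only [List.nil_append, List.length_nil] at this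
    rw [this]
    simp
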